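-- pv_equiv track=rewrite | github.com/pypi-data/pypi-mirror-404 | packages/biobridge/biobridge-0.2.7.tar.gz/biobridge-0.2.7/biobridge/genes/dna.py | identify_exons
-- ===== SOURCE A (Python) =====
-- def identify_exons(sequence):
--     """
--     Identify exons in the given sequence using a simple algorithm.
--     In this example, we'll consider regions between stop codons as potential exons.
--
--     :param sequence: The RNA sequence to analyze
--     :return: A list of tuples representing exon ranges (start, end)
--     """
--     stop_codons = ['UAA', 'UAG', 'UGA']
--     exons = []
--     start = 0
--     for i in range(0, len(sequence) - 2, 3):
--         if sequence[i:i + 3] in stop_codons: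
--             if i > start:
--                 exons.append((start, i))
--             start = i + 3
--     if start < len(sequence):
--         exons.append((start, len(sequence)))
--     return exons
-- ===== SOURCE B (Python) =====
-- STOP_CODONS = ('UAA', 'UAG', 'UGA')
--
--
-- def identify_exons(sequence):
--     """Multi-pattern substring search instead of a stride-3 scan: collect the
--     frame-aligned occurrences of each stop codon with repeated str.find, sort
--     the merged positions, then pair boundary lists into non-empty exons."""
--     n = len(sequence)
--     stops = []
--     for codon in STOP_CODONS:
--         j = sequence.find(codon)
--         while j != -1:
--             if j % 3 == 0:
--                 stops.append(j)
--             j = sequence.find(codon, j + 1)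
--     stops.sort()
--     starts = [0] + [s + 3 for s in stops]
--     ends = stops + [n]
--     return [(a, b) for a, b in zip(starts, ends) if a < b]
-- ===== Notes on version B (the rewrite author's own statement) =====
-- stated objective: faster
-- what changed: Replaces A's stride-3 scan that slices and tests every codon position in Python with a multi-pattern substring search: for each of the three stop codons, repeated str.find collects its occurrences (keeping frame-aligned ones), the merged positions are sorted, and exons are formed by pairing boundary lists and dropping empty segments.
import Mathlib
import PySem

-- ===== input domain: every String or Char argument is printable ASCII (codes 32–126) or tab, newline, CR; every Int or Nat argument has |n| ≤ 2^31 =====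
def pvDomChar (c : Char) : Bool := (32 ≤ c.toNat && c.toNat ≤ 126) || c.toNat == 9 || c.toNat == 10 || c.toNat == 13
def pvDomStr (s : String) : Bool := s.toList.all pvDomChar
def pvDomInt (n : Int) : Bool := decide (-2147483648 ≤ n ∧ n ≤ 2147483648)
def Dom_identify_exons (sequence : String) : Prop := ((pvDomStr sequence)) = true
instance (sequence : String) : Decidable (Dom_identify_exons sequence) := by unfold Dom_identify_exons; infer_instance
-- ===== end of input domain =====

-- B replaces A's per-codon slicing scan with a multi-pattern substring search
-- (repeated str.find per stop codon, frame filter, sort, boundary pairing);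
-- measured faster in a timing run (C-level find vs Python-level slices).


-- ===== PORT A =====
def pvStopCodons : List (List Char) := [['U','A','A'], ['U','A','G'], ['U','G','A']]

def identify_exons (sequence : String) : List (Int × Int) :=
  let cs := sequence.toList
  let n : Int := cs.length
  let st :=
    (PySem.List.pyRange 0 (n - 2) 3).foldl
      (fun (st : List (Int × Int) × Int) i =>
        if PySem.List.slice cs (some i) (some (i + 3)) ∈ pvStopCodons then
          (if st.2 < i then st.1 ++ [(st.2, i)] else st.1, i + 3)
        else st)
      ([], 0)
  if st.2 < n then st.1 ++ [(st.2, n)] else st.1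

-- ===== PORT B =====
-- Source B's module constant STOP_CODONS is the same literal as A's stop_codons,
-- so both ports share pvStopCodons.
-- Source B's inner 'while j != -1' loop for one codon; fuel only makes the loop
-- total (cs.length + 1 iterations always suffice: j strictly increases).
def pvFindLoop (cs codon : List Char) : Nat → Int → List Int → List Int
  | 0, _, acc => acc
  | (fuel+1), j, acc =>
    if j = -1 then acc
    else pvFindLoop cs codon fuel (PySem.Chars.findFrom cs codon (j + 1))
           (if PySem.Int.mod j 3 = 0 then acc ++ [j] else acc)

def identify_exons_alt (sequence : String) : List (Int × Int) :=
  let cs := sequence.toList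
  let n : Int := cs.length
  let stops :=
    pvStopCodons.foldl
      (fun acc c => pvFindLoop cs c (cs.length + 1) (PySem.Chars.findFrom cs c 0) acc) []
  let sortedStops := PySem.List.sorted stops (fun x => x)
  let starts := 0 :: sortedStops.map (· + 3)
  let ends := sortedStops ++ [n]
  (starts.zip ends).filter (fun p => p.1 < p.2)

-- ===== PRECONDITION & SPEC =====
def Spec_identify_exons (sequence : String) (out : List (Int × Int)) : Prop := out = identify_exons_alt sequence
instance (sequence : String) (out : List (Int × Int)) : Decidable (Spec_identify_exons sequence out) := by unfold Spec_identify_exons; infer_instance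

-- ===== CLAIM (what is proved, stated in full; the proofs are below) =====
def Claim_equal_identify_exons : Prop := ∀ (sequence : String), Dom_identify_exons sequence → Spec_identify_exons sequence (identify_exons sequence)

-- ===== LEMMAS AND PROOFS =====

-- A's loop body is the identity on non-stop indices, so folding over the range
-- equals folding only over the filtered stop indices.
theorem pv_foldl_if_filter {α β : Type} (P : α → Prop) [DecidablePred P] (f : β → α → β)
    (L : List α) (init : β) :
    L.foldl (fun st i => if P i then f st i else st) init
      = (L.filter (fun i => decide (P i))).foldl f init := by
  induction L generalizing init with
  | nil => rfl
  | cons a L ih =>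
      by_cases h : P a
      · simp [h, ih]
      · simp [h, ih]

-- The interleaved loop over the stop list S, followed by the tail append,
-- produces exactly the zip-of-boundaries form.
theorem pv_segments (n : Int) (S : List Int) (acc : List (Int × Int)) (start : Int) :
    (let st := S.foldl
        (fun (st : List (Int × Int) × Int) i =>
          (if st.2 < i then st.1 ++ [(st.2, i)] else st.1, i + 3)) (acc, start)
     if st.2 < n then st.1 ++ [(st.2, n)] else st.1)
      = acc ++ ((start :: S.map (· + 3)).zip (S ++ [n])).filter (fun p => p.1 < p.2) := by
  induction S generalizing acc start with
  | nil =>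
      by_cases h : start < n
      · simp [List.foldl, h]
      · simp [List.foldl, h]
  | cons i S ih =>
      by_cases h : start < i
      · simp only [List.foldl_cons, List.map_cons, List.cons_append,
          List.zip_cons_cons, List.filter_cons, decide_true, h]
        rw [ih]
        simp [List.append_assoc]
      · simp only [List.foldl_cons, if_neg h, List.map_cons, List.cons_append,
          List.zip_cons_cons, List.filter_cons]
        rw [ih]
        simp [h]

-- Both phases of A combined, over an arbitrary index list and stop predicate.
theorem pv_combined (n : Int) (L : List Int) (P : Int → Prop) [DecidablePred P] :
    (let st := L.foldl
        (fun (st : List (Int × Int) × Int) i =>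
          if P i then (if st.2 < i then st.1 ++ [(st.2, i)] else st.1, i + 3) else st)
        ([], 0)
     if st.2 < n then st.1 ++ [(st.2, n)] else st.1)
      = (let S := L.filter (fun i => decide (P i))
         ((0 :: S.map (· + 3)).zip (S ++ [n])).filter (fun p => p.1 < p.2)) := by
  simp only []
  rw [pv_foldl_if_filter P]
  exact pv_segments n _ [] 0

-- Canonical value of one find-loop of B: the frame-aligned occurrences of
-- `codon` at positions ≥ k, in increasing order.
def pvCanon (cs codon : List Char) (k : Nat) : List Int :=
  List.map (fun p : Nat => (p : Int))
    ((List.range cs.length).filter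
      (fun p => decide (k ≤ p) && (p % 3 == 0) && decide (codon <+: cs.drop p)))

theorem pvCanon_nil (cs codon : List Char) (k : Nat) (h : ¬ codon <:+: cs.drop k) :
    pvCanon cs codon k = [] := by
  unfold pvCanon
  rw [List.map_eq_nil_iff, List.filter_eq_nil_iff]
  intro p _
  simp only [Bool.and_eq_true, decide_eq_true_eq, beq_iff_eq]
  rintro ⟨⟨hkp, -⟩, hpre⟩
  exact h ((PySem.Chars.isIn_iff_infix codon (cs.drop k)).mp
    ((PySem.Chars.exists_prefix_drop_iff_isIn codon (cs.drop k)).mp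
      ⟨p - k, by rwa [List.drop_drop, Nat.add_sub_cancel' hkp]⟩))

theorem pvCanon_split (cs codon : List Char) (k J : Nat)
    (hcod : codon ≠ []) (hkJ : k ≤ J) (hpre : codon <+: cs.drop J)
    (hmin : ∀ i, k ≤ i → i < J → ¬ codon <+: cs.drop i) :
    pvCanon cs codon k
      = (if J % 3 = 0 then [(J : Int)] else []) ++ pvCanon cs codon (J + 1) := by
  have hJ : J < cs.length := by
    have h1 := hpre.length_le
    have h2 : 0 < codon.length := List.length_pos_iff.mpr hcod
    simp only [List.length_drop] at h1
    omega
  have hrange : List.range cs.length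
      = List.range (J + 1) ++ (List.range (cs.length - (J + 1))).map (fun x => (J + 1) + x) := by
    rw [← List.range_add]
    congr 1
    omega
  unfold pvCanon
  rw [hrange, List.filter_append, List.filter_append, List.map_append, List.map_append]
  have hfirst : ((List.range (J + 1)).filter
      (fun p => decide (k ≤ p) && (p % 3 == 0) && decide (codon <+: cs.drop p)))
      = if J % 3 = 0 then [J] else [] := by
    rw [List.range_succ, List.filter_append]
    have hnil : ((List.range J).filter
        (fun p => decide (k ≤ p) && (p % 3 == 0) && decide (codon <+: cs.drop p))) = [] := by
      rw [List.filter_eq_nil_iff]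
      intro p hp
      simp only [List.mem_range] at hp
      simp only [Bool.and_eq_true, decide_eq_true_eq, beq_iff_eq]
      rintro ⟨⟨hkp, -⟩, hpre⟩
      exact hmin p hkp hp hpre
    rw [hnil, List.nil_append]
    by_cases hm : J % 3 = 0
    · simp [hm, hkJ, hpre]
    · simp [hm, hkJ, hpre]
  have hfirst' : ((List.range (J + 1)).filter
      (fun p => decide (J + 1 ≤ p) && (p % 3 == 0) && decide (codon <+: cs.drop p))) = [] := by
    rw [List.filter_eq_nil_iff]
    intro p hp
    simp only [List.mem_range] at hp
    simp only [Bool.and_eq_true, decide_eq_true_eq, beq_iff_eq]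
    rintro ⟨⟨hkp, -⟩, -⟩
    omega
  have hsecond : ∀ p ∈ (List.range (cs.length - (J + 1))).map (fun x => (J + 1) + x),
      (decide (k ≤ p) && (p % 3 == 0) && decide (codon <+: cs.drop p))
        = (decide (J + 1 ≤ p) && (p % 3 == 0) && decide (codon <+: cs.drop p)) := by
    intro p hp
    simp only [List.mem_map, List.mem_range] at hp
    obtain ⟨x, -, hx⟩ := hp
    have h1 : k ≤ p := by omega
    have h2 : J + 1 ≤ p := by omega
    simp [h1, h2]
  rw [hfirst, hfirst', List.filter_congr hsecond]
  by_cases hm : J % 3 = 0 <;> simp [hm]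

theorem pvFindLoop_eq (cs codon : List Char) (hcod : codon ≠ []) :
    ∀ (fuel k : Nat) (acc : List Int), k ≤ cs.length → cs.length + 1 - k ≤ fuel →
    pvFindLoop cs codon fuel (PySem.Chars.findFrom cs codon (k : Int)) acc
      = acc ++ pvCanon cs codon k := by
  intro fuel
  induction fuel with
  | zero => intro k acc hk hf; omega
  | succ fuel ih =>
    intro k acc hk hf
    by_cases hj : PySem.Chars.findFrom cs codon (k : Int) = -1
    · rw [pvCanon_nil cs codon k
        ((PySem.Chars.findFrom_natCast_eq_neg_one_iff cs codon k hk).mp hj)]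
      simp [pvFindLoop, hj]
    · obtain ⟨h1, h2, h3⟩ := PySem.Chars.findFrom_natCast_spec cs codon k hk hj
      set j := PySem.Chars.findFrom cs codon (k : Int) with hjdef
      have hj0 : 0 ≤ j := le_trans (Int.natCast_nonneg k) h1
      have hjn : j = ((j.toNat : Nat) : Int) := (Int.toNat_of_nonneg hj0).symm
      have hkJ : k ≤ j.toNat := by omega
      have hJlen : j.toNat + 1 ≤ cs.length := by
        have hl := h2.length_le
        have hc : 0 < codon.length := List.length_pos_iff.mpr hcod
        simp only [List.length_drop] at hl
        omega
      have hcast : j + 1 = ((j.toNat + 1 : Nat) : Int) := by push_cast; omega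
      have hmod : PySem.Int.mod j 3 = 0 ↔ j.toNat % 3 = 0 := by
        rw [hjn, show ((3 : Int)) = ((3 : Nat) : Int) from rfl, PySem.Int.mod_natCast]
        exact_mod_cast Iff.rfl
      simp only [pvFindLoop, hj, if_false]
      rw [hcast, ih (j.toNat + 1) _ hJlen (by omega),
        pvCanon_split cs codon k j.toNat hcod hkJ h2 (fun i hki hiJ => h3 i hki hiJ)]
      by_cases hm : j.toNat % 3 = 0
      · rw [if_pos (hmod.mpr hm), if_pos hm, ← hjn, List.append_assoc]
      · rw [if_neg (fun h => hm (hmod.mp h)), if_neg hm]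
        simp

-- A 3-character codon is a prefix of cs.drop p exactly when the frame slice
-- cs[p:p+3] equals it (and then p+3 ≤ len).
theorem pv_at (cs c : List Char) (p : Nat) (hc : c.length = 3) :
    c <+: cs.drop p ↔ PySem.List.slice cs (some (p : Int)) (some ((p : Int) + 3)) = c := by
  have hsl : PySem.List.slice cs (some (p : Int)) (some ((p : Int) + 3))
      = (cs.drop p).take 3 := by
    have := PySem.List.slice_natCast_add cs p 3
    simpa using this
  rw [hsl]
  constructor
  · intro hpre
    have := List.prefix_iff_eq_take.mp hpre
    rw [hc] at this
    exact this.symm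
  · intro heq
    exact List.prefix_iff_eq_take.mpr (by rw [hc, heq])

theorem pv_at_len (cs c : List Char) (p : Nat) (hc : c.length = 3)
    (hpre : c <+: cs.drop p) : p + 3 ≤ cs.length := by
  have hl := hpre.length_le
  simp only [List.length_drop, hc] at hl
  omega

theorem pvCanon_nodup (cs codon : List Char) : (pvCanon cs codon 0).Nodup := by
  unfold pvCanon
  refine List.Nodup.map (fun a b h => ?_) (List.Nodup.filter _ List.nodup_range)
  exact_mod_cast h

theorem pvCanon_mem (cs codon : List Char) (x : Int) :
    x ∈ pvCanon cs codon 0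
      ↔ ∃ p : Nat, p < cs.length ∧ p % 3 = 0 ∧ codon <+: cs.drop p ∧ x = (p : Int) := by
  unfold pvCanon
  simp only [List.mem_map, List.mem_filter, List.mem_range, Bool.and_eq_true,
    decide_eq_true_eq, beq_iff_eq]
  constructor
  · rintro ⟨p, ⟨hp, ⟨⟨-, hm⟩, hpre⟩⟩, rfl⟩
    exact ⟨p, hp, hm, hpre, rfl⟩
  · rintro ⟨p, hp, hm, hpre, rfl⟩
    exact ⟨p, ⟨hp, ⟨⟨Nat.zero_le p, hm⟩, hpre⟩⟩, rfl⟩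

-- The merged, sorted find-results of the three codons are exactly A's
-- filtered stride-3 index list.
theorem pv_stops_eq (cs : List Char) :
    PySem.List.sorted
      (pvStopCodons.foldl
        (fun acc c => pvFindLoop cs c (cs.length + 1) (PySem.Chars.findFrom cs c 0) acc) [])
      (fun x => x)
      = (PySem.List.pyRange 0 ((cs.length : Int) - 2) 3).filter
          (fun i => decide (PySem.List.slice cs (some i) (some (i + 3)) ∈ pvStopCodons)) := by
  have hloop : ∀ (c : List Char) (acc : List Int), c ≠ [] →
      pvFindLoop cs c (cs.length + 1) (PySem.Chars.findFrom cs c 0) acc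
        = acc ++ pvCanon cs c 0 := by
    intro c acc hc
    have := pvFindLoop_eq cs c hc (cs.length + 1) 0 acc (Nat.zero_le _) (by omega)
    simpa using this
  have hC : pvStopCodons.foldl
      (fun acc c => pvFindLoop cs c (cs.length + 1) (PySem.Chars.findFrom cs c 0) acc) []
      = pvCanon cs ['U','A','A'] 0 ++ pvCanon cs ['U','A','G'] 0 ++ pvCanon cs ['U','G','A'] 0 := by
    simp only [pvStopCodons, List.foldl_cons, List.foldl_nil]
    rw [hloop _ _ (by simp), hloop _ _ (by simp), hloop _ _ (by simp)]
    simp [List.append_assoc]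
  rw [hC]
  set S := (PySem.List.pyRange 0 ((cs.length : Int) - 2) 3).filter
      (fun i => decide (PySem.List.slice cs (some i) (some (i + 3)) ∈ pvStopCodons)) with hS
  have hSpair : S.Pairwise (fun a b => a < b) := by
    apply List.Pairwise.filter
    rw [PySem.List.pyRange_of_pos 0 _ (by norm_num)]
    refine List.pairwise_map.mpr ?_
    exact List.pairwise_lt_range.imp (fun h => by omega)
  -- membership bridge
  have hmem : ∀ x : Int, x ∈ S ↔
      x ∈ pvCanon cs ['U','A','A'] 0 ++ pvCanon cs ['U','A','G'] 0 ++ pvCanon cs ['U','G','A'] 0 := by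
    intro x
    rw [hS]
    simp only [List.mem_append, pvCanon_mem, List.mem_filter,
      PySem.List.mem_pyRange_iff_of_pos (by norm_num : (0:Int) < 3), decide_eq_true_eq]
    constructor
    · rintro ⟨⟨hx0, hxn, hdvd⟩, hsl⟩
      have hp : x = ((x.toNat : Nat) : Int) := (Int.toNat_of_nonneg hx0).symm
      set p := x.toNat with hpd
      have hm : p % 3 = 0 := by
        have h3 : ((3:Nat) : Int) ∣ ((p : Nat) : Int) := by rw [← hp]; simpa using hdvd
        have := Int.natCast_dvd_natCast.mp h3
        omega
      have hplen : p < cs.length := by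
        have : (p : Int) < (cs.length : Int) - 2 := hp ▸ hxn
        omega
      rw [hp] at hsl
      simp only [pvStopCodons, List.mem_cons, List.not_mem_nil, or_false] at hsl
      rcases hsl with h | h | h
      · exact Or.inl (Or.inl ⟨p, hplen, hm, (pv_at cs _ p rfl).mpr h, hp⟩)
      · exact Or.inl (Or.inr ⟨p, hplen, hm, (pv_at cs _ p rfl).mpr h, hp⟩)
      · exact Or.inr ⟨p, hplen, hm, (pv_at cs _ p rfl).mpr h, hp⟩
    · intro hcase
      have key : ∀ c : List Char, c.length = 3 → c ∈ pvStopCodons →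
          (∃ p : Nat, p < cs.length ∧ p % 3 = 0 ∧ c <+: cs.drop p ∧ x = (p : Int)) →
          ((0 ≤ x ∧ x < (cs.length : Int) - 2 ∧ 3 ∣ x - 0) ∧
            PySem.List.slice cs (some x) (some (x + 3)) ∈ pvStopCodons) := by
        rintro c hc hcmem ⟨p, hplen, hm, hpre, rfl⟩
        have hlen3 : p + 3 ≤ cs.length := pv_at_len cs c p hc hpre
        refine ⟨⟨by omega, by omega, ?_⟩, ?_⟩
        · have : (3:Nat) ∣ p := Nat.dvd_of_mod_eq_zero hm
          simpa using Int.natCast_dvd_natCast.mpr this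
        · rw [(pv_at cs c p hc).mp hpre]
          exact hcmem
      rcases hcase with (h | h) | h
      · exact key _ rfl (by simp [pvStopCodons]) h
      · exact key _ rfl (by simp [pvStopCodons]) h
      · exact key _ rfl (by simp [pvStopCodons]) h
  -- nodup of the merged find-results: each block is nodup, blocks are disjoint
  have hdis : ∀ (c c' : List Char), c.length = 3 → c'.length = 3 → c ≠ c' →
      ∀ x, x ∈ pvCanon cs c 0 → x ∈ pvCanon cs c' 0 → False := by
    intro c c' hc hc' hne x hx hx'
    obtain ⟨p, _, _, hpre, rfl⟩ := (pvCanon_mem _ _ _).mp hx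
    obtain ⟨q, _, _, hpre', hq⟩ := (pvCanon_mem _ _ _).mp hx'
    have hpq : q = p := by exact_mod_cast hq.symm
    subst hpq
    exact hne ((List.prefix_of_prefix_length_le hpre hpre' (by omega)).eq_of_length (by omega))
  have hCnd : (pvCanon cs ['U','A','A'] 0 ++ pvCanon cs ['U','A','G'] 0
      ++ pvCanon cs ['U','G','A'] 0).Nodup := by
    rw [List.nodup_append, List.nodup_append]
    refine ⟨⟨pvCanon_nodup cs _, pvCanon_nodup cs _, ?_⟩, pvCanon_nodup cs _, ?_⟩
    · intro x hx y hy hxy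
      subst hxy
      exact hdis ['U','A','A'] ['U','A','G'] rfl rfl (by decide) x hx hy
    · intro x hx y hy hxy
      subst hxy
      rcases List.mem_append.mp hx with h | h
      · exact hdis ['U','A','A'] ['U','G','A'] rfl rfl (by decide) x h hy
      · exact hdis ['U','A','G'] ['U','G','A'] rfl rfl (by decide) x h hy
  have hSnd : S.Nodup := hSpair.imp (fun h => ne_of_lt h)
  exact PySem.List.sorted_eq_of_perm_of_pairwise_lt _ _ _
    (List.perm_of_nodup_nodup_toFinset_eq hSnd hCnd
      (Finset.ext (fun x => by
        simp only [List.mem_toFinset]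
        exact hmem x)))
    hSpair

-- ===== VERDICT (by name: the statement is the Claim_ definition above) =====
theorem identify_exons_spec : Claim_equal_identify_exons := by
  intro s _
  unfold Spec_identify_exons identify_exons identify_exons_alt
  refine (pv_combined ((s.toList.length : Int))
    (PySem.List.pyRange 0 ((s.toList.length : Int) - 2) 3)
    (fun i => PySem.List.slice s.toList (some i) (some (i + 3)) ∈ pvStopCodons)).trans ?_
  rw [← pv_stops_eq]
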